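-- pv_equiv track=rewrite | github.com/NeylSullivan/DevOps | Core/generate_readme.py | sanitize_file_content
-- ===== SOURCE A (Python) =====
-- TAG_AUTO_GENERATED_CONTENT_START = '<!-- AUTO_GENERATED_CONTENT_START -->'
--
-- TAG_AUTO_GENERATED_CONTENT_END = '<!-- AUTO_GENERATED_CONTENT_END -->'
--
-- def sanitize_file_content(file_content):
--     """
--     Try to sanitize file_content, removing all lines between start/end tags
--     """
--     lines = file_content.splitlines(keepends=True)
--     start_tag_line_idx = -1
--     end_tag_line_idx = -1
--     for idx in range(len(lines)):
--         if start_tag_line_idx == -1 and lines[idx].startswith(TAG_AUTO_GENERATED_CONTENT_START):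
--             start_tag_line_idx = idx
--             continue
--
--         # Don't stop, check to the end
--         if lines[idx].startswith(TAG_AUTO_GENERATED_CONTENT_END):
--             end_tag_line_idx = idx
--
--     if start_tag_line_idx != -1 and end_tag_line_idx != -1 and start_tag_line_idx < end_tag_line_idx:
--         for idx in range(start_tag_line_idx + 1, end_tag_line_idx):
--             lines[idx] = ''
--         file_content = ''.join(lines)
--
--     return file_content
-- ===== SOURCE B (Python) =====
-- TAG_AUTO_GENERATED_CONTENT_START = '<!-- AUTO_GENERATED_CONTENT_START -->'
--
-- TAG_AUTO_GENERATED_CONTENT_END = '<!-- AUTO_GENERATED_CONTENT_END -->'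
--
-- def sanitize_file_content(file_content):
--     """
--     Remove all lines between the first start tag and the last end tag.
--     """
--     lines = file_content.splitlines(keepends=True)
--     start_idx = None
--     for i, line in enumerate(lines):
--         if line.startswith(TAG_AUTO_GENERATED_CONTENT_START):
--             start_idx = i
--             break
--     end_idx = None
--     for j in range(len(lines) - 1, -1, -1):
--         if lines[j].startswith(TAG_AUTO_GENERATED_CONTENT_END):
--             end_idx = j
--             break
--     if start_idx is not None and end_idx is not None and start_idx < end_idx:
--         return ''.join(lines[:start_idx + 1] + lines[end_idx:])
--     return file_content
-- ===== Notes on version B (the rewrite author's own statement) =====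
-- stated objective: simpler
-- what changed: A runs one index loop maintaining two mutable tag indices over every line and then blanks the middle lines one by one before joining the whole list; B uses two independent short-circuit scans (forward for the first start tag, backward for the last end tag) and returns the join of the two kept slices, with no blanking pass.
import Mathlib
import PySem

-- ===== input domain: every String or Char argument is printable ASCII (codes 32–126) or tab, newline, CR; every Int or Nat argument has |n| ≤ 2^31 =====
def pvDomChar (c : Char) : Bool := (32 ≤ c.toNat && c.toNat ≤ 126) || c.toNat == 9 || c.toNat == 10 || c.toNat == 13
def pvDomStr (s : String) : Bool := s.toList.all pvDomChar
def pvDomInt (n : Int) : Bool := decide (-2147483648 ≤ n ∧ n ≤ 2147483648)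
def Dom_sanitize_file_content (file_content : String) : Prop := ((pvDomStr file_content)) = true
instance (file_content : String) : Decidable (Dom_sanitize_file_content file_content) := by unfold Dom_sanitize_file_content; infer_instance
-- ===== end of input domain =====

-- B replaces A's single index-maintaining scan plus per-line blanking pass by two independent
-- short-circuit scans (first start tag forward, last end tag backward) and a slice (objective: simpler).

-- Shared helper: str.splitlines(keepends=True); exact on the Dom alphabet, where the only line
-- breaks are '\n', '\r' and '\r\n' (Python's extra break characters \v, \f, … lie outside Dom).
def pvSplitKeep : List Char → List Char → List (List Char)
  | acc, [] => if acc.isEmpty then [] else [acc.reverse]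
  | acc, '\r' :: '\n' :: rest => (acc.reverse ++ ['\r', '\n']) :: pvSplitKeep [] rest
  | acc, c :: rest =>
    if c = '\r' then (acc.reverse ++ ['\r']) :: pvSplitKeep [] rest
    else if c = '\n' then (acc.reverse ++ ['\n']) :: pvSplitKeep [] rest
    else pvSplitKeep (c :: acc) rest

def pvStartTag : List Char := "<!-- AUTO_GENERATED_CONTENT_START -->".toList
def pvEndTag : List Char := "<!-- AUTO_GENERATED_CONTENT_END -->".toList

-- ===== PORT A =====
def sanitize_file_content (file_content : String) : String :=
  let lines := pvSplitKeep [] file_content.toList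
  let st := (PySem.List.pyRange 0 (PySem.List.len lines) 1).foldl
    (fun (p : Int × Int) idx =>
      if p.1 == -1 && PySem.Chars.startswith (PySem.List.pyGetD lines idx []) pvStartTag then (idx, p.2)
      else if PySem.Chars.startswith (PySem.List.pyGetD lines idx []) pvEndTag then (p.1, idx)
      else p) ((-1 : Int), (-1 : Int))
  if st.1 ≠ -1 ∧ st.2 ≠ -1 ∧ st.1 < st.2 then
    let lines2 := (PySem.List.pyRange (st.1 + 1) st.2 1).foldl
      (fun ls i => PySem.List.pySetD ls i ([] : List Char)) lines
    String.ofList (PySem.Chars.join [] lines2)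
  else file_content

-- ===== PORT B =====
-- forward scan, break on the first line starting with the start tag
def pvFindStart : List (List Char) → Nat → Option Nat
  | [], _ => none
  | l :: ls, i => if PySem.Chars.startswith l pvStartTag then some i else pvFindStart ls (i + 1)

-- scan of the lines in reverse order, index counting down: first hit = last end-tag line
def pvFindEndRev : List (List Char) → Nat → Option Nat
  | [], _ => none
  | l :: ls, i => if PySem.Chars.startswith l pvEndTag then some i else pvFindEndRev ls (i - 1)

def sanitize_file_content_alt (file_content : String) : String :=
  let lines := pvSplitKeep [] file_content.toList
  match pvFindStart lines 0, pvFindEndRev lines.reverse (lines.length - 1) with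
  | some s, some e =>
      if s < e then String.ofList (PySem.Chars.join [] (lines.take (s + 1) ++ lines.drop e))
      else file_content
  | some _, none => file_content
  | none, _ => file_content

-- ===== PRECONDITION & SPEC =====
def Spec_sanitize_file_content (file_content : String) (out : String) : Prop := out = sanitize_file_content_alt file_content
instance (file_content : String) (out : String) : Decidable (Spec_sanitize_file_content file_content out) := by unfold Spec_sanitize_file_content; infer_instance

-- ===== CLAIM (what is proved, stated in full; the proofs are below) =====
def Claim_equal_sanitize_file_content : Prop := ∀ (file_content : String), Dom_sanitize_file_content file_content → Spec_sanitize_file_content file_content (sanitize_file_content file_content)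

-- ===== LEMMAS AND PROOFS =====

-- no line can start with both tags (one would be a prefix of the other)
theorem pv_excl (l : List Char) (h : PySem.Chars.startswith l pvStartTag = true) :
    PySem.Chars.startswith l pvEndTag = false := by
  by_contra hq
  rw [Bool.not_eq_false, PySem.Chars.startswith_iff] at hq
  rw [PySem.Chars.startswith_iff] at h
  rcases List.prefix_or_prefix_of_prefix h hq with hp | hp
  · exact absurd hp (by decide)
  · exact absurd hp (by decide)

-- the last index whose line starts with the end tag
def pvLastQ : List (List Char) → Option Nat
  | [] => none
  | l :: ls =>
    match pvLastQ ls with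
    | some j => some (j + 1)
    | none => if PySem.Chars.startswith l pvEndTag then some 0 else none

def pvS (ls : List (List Char)) : Int :=
  match List.findIdx? (fun l => PySem.Chars.startswith l pvStartTag) ls with
  | some j => (j : Int)
  | none => -1

def pvE (ls : List (List Char)) : Int :=
  match pvLastQ ls with
  | some j => (j : Int)
  | none => -1

theorem pvLastQ_append_singleton (ts : List (List Char)) (t : List Char) :
    pvLastQ (ts ++ [t]) =
      if PySem.Chars.startswith t pvEndTag then some ts.length else pvLastQ ts := by
  induction ts with
  | nil => simp [pvLastQ]
  | cons u us ih =>
    simp only [List.cons_append, pvLastQ, ih, List.length_cons]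
    by_cases hq : PySem.Chars.startswith t pvEndTag = true
    · simp [hq]
    · cases h : pvLastQ us <;> simp [hq]

theorem pvLastQ_lt_length (ls : List (List Char)) (j : Nat) (h : pvLastQ ls = some j) :
    j < ls.length := by
  induction ls generalizing j with
  | nil => simp [pvLastQ] at h
  | cons l ls ih =>
    simp only [pvLastQ] at h
    cases hq : pvLastQ ls with
    | some j' =>
      rw [hq] at h
      simp only [Option.some.injEq] at h
      have := ih j' hq
      simp only [List.length_cons]
      omega
    | none =>
      rw [hq] at h
      by_cases hQ : PySem.Chars.startswith l pvEndTag = true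
      · simp only [hQ, if_true, Option.some.injEq] at h
        simp only [List.length_cons]
        omega
      · simp [hQ] at h

theorem pvFindStart_shift (ls : List (List Char)) : ∀ k, pvFindStart ls k =
    (List.findIdx? (fun l => PySem.Chars.startswith l pvStartTag) ls).map (k + ·) := by
  induction ls with
  | nil => intro k; simp [pvFindStart]
  | cons l ls ih =>
    intro k
    by_cases h : PySem.Chars.startswith l pvStartTag = true
    · simp [pvFindStart, h, List.findIdx?_cons]
    · simp only [pvFindStart, List.findIdx?_cons, h, if_false, Bool.false_eq_true, ih,
        Option.map_map]
      cases List.findIdx? (fun l => PySem.Chars.startswith l pvStartTag) ls <;> (simp; try omega)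

theorem pvFindStart_eq (ls : List (List Char)) :
    pvFindStart ls 0 = List.findIdx? (fun l => PySem.Chars.startswith l pvStartTag) ls := by
  rw [pvFindStart_shift ls 0]
  cases List.findIdx? (fun l => PySem.Chars.startswith l pvStartTag) ls <;> simp

theorem pvFindEndRev_eq (ls : List (List Char)) :
    pvFindEndRev ls.reverse (ls.length - 1) = pvLastQ ls := by
  induction ls using List.reverseRecOn with
  | nil => simp [pvFindEndRev, pvLastQ]
  | append_singleton ts t ih =>
    rw [pvLastQ_append_singleton]
    have h1 : (ts ++ [t]).reverse = t :: ts.reverse := by simp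
    have h2 : (ts ++ [t]).length - 1 = ts.length := by simp
    rw [h1, h2]
    by_cases hQ : PySem.Chars.startswith t pvEndTag = true
    · simp [pvFindEndRev, hQ]
    · simp [pvFindEndRev, hQ, ih]

-- A's scanning loop computes (first start-tag index, last end-tag index), -1 when absent
theorem pv_loopA (ls : List (List Char)) :
    (PySem.List.pyRange 0 (PySem.List.len ls) 1).foldl
      (fun (p : Int × Int) idx =>
        if p.1 == -1 && PySem.Chars.startswith (PySem.List.pyGetD ls idx []) pvStartTag then (idx, p.2)
        else if PySem.Chars.startswith (PySem.List.pyGetD ls idx []) pvEndTag then (p.1, idx)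
        else p) ((-1 : Int), (-1 : Int)) = (pvS ls, pvE ls) := by
  induction ls using List.reverseRecOn with
  | nil =>
    rw [show PySem.List.len ([] : List (List Char)) = 0 by simp,
      PySem.List.pyRange_one_eq_nil le_rfl]
    simp [pvS, pvE, pvLastQ]
  | append_singleton ts t ih =>
    have hlen : PySem.List.len (ts ++ [t]) = (ts.length : Int) + 1 := by
      simp
    rw [hlen, PySem.List.pyRange_one_succ_right (by positivity), List.foldl_append]
    simp only [PySem.List.len_eq] at ih
    have hcongr : ∀ (acc : Int × Int), ∀ idx ∈ PySem.List.pyRange 0 (ts.length : Int) 1,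
        (fun (p : Int × Int) idx =>
          if p.1 == -1 && PySem.Chars.startswith (PySem.List.pyGetD (ts ++ [t]) idx []) pvStartTag then (idx, p.2)
          else if PySem.Chars.startswith (PySem.List.pyGetD (ts ++ [t]) idx []) pvEndTag then (p.1, idx)
          else p) acc idx =
        (fun (p : Int × Int) idx =>
          if p.1 == -1 && PySem.Chars.startswith (PySem.List.pyGetD ts idx []) pvStartTag then (idx, p.2)
          else if PySem.Chars.startswith (PySem.List.pyGetD ts idx []) pvEndTag then (p.1, idx)
          else p) acc idx := by
      intro acc idx hidx
      rw [PySem.List.mem_pyRange_one] at hidx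
      obtain ⟨k, rfl⟩ : ∃ k : Nat, idx = (k : Int) := ⟨idx.toNat, by omega⟩
      have hk : k < ts.length := by exact_mod_cast hidx.2
      have hget : PySem.List.pyGetD (ts ++ [t]) (k : Int) ([] : List Char) = PySem.List.pyGetD ts (k : Int) ([] : List Char) := by
        rw [PySem.List.pyGetD_natCast, PySem.List.pyGetD_natCast]
        simp [List.getD_eq_getElem?_getD, List.getElem?_append_left, hk]
      simp [hget]
    rw [PySem.List.foldl_congr_mem _ _ _ _ hcongr, ih]
    have hget2 : PySem.List.pyGetD (ts ++ [t]) (ts.length : Int) ([] : List Char) = t := by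
      rw [PySem.List.pyGetD_natCast]
      simp [List.getD_eq_getElem?_getD]
    simp only [List.foldl_cons, List.foldl_nil, hget2]
    unfold pvS pvE
    rw [List.findIdx?_append, pvLastQ_append_singleton]
    cases hP : List.findIdx? (fun l => PySem.Chars.startswith l pvStartTag) ts with
    | some j =>
      have hne : ((j : Int) == -1) = false := by simp
      by_cases hQ : PySem.Chars.startswith t pvEndTag = true
      · simp [hne, hQ]
      · cases hq : pvLastQ ts <;> simp [hne, hQ]
    | none =>
      by_cases hPt : PySem.Chars.startswith t pvStartTag = true
      · have hQt := pv_excl t hPt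
        cases hq : pvLastQ ts <;> simp [hPt, hQt, List.findIdx?_cons]
      · by_cases hQ : PySem.Chars.startswith t pvEndTag = true
        · cases hq : pvLastQ ts <;> simp [hPt, hQ, List.findIdx?_cons]
        · cases hq : pvLastQ ts <;> simp [hPt, hQ, List.findIdx?_cons]

theorem pv_take_len_succ (xs : List (List Char)) (v : List Char) (ys : List (List Char)) :
    (xs ++ v :: ys).take (xs.length + 1) = xs ++ [v] := by
  induction xs with
  | nil => simp
  | cons x xs ih => simp [List.length_cons, List.take_succ_cons, ih]

theorem pv_take_set (l : List (List Char)) (a : Nat) (h : a < l.length) :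
    (l.set a ([] : List Char)).take (a + 1) = l.take a ++ [[]] := by
  have h2 : (List.take a l).length = a := by rw [List.length_take]; omega
  have key := pv_take_len_succ (List.take a l) [] (List.drop (a + 1) l)
  rw [h2] at key
  rw [List.set_eq_take_append_cons_drop, if_pos h, key]

theorem pv_setfold_aux (n : Nat) : ∀ (a : Nat) (ls : List (List Char)), a + n ≤ ls.length →
    (PySem.List.pyRange (a : Int) ((a + n : Nat) : Int) 1).foldl
      (fun t i => PySem.List.pySetD t i ([] : List Char)) ls
      = ls.take a ++ List.replicate n [] ++ ls.drop (a + n) := by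
  induction n with
  | zero =>
    intro a ls _
    rw [Nat.add_zero, PySem.List.pyRange_one_eq_nil le_rfl]
    simp [List.take_append_drop]
  | succ n ih =>
    intro a ls h
    have hcast : ((a + (n + 1) : Nat) : Int) = ((a + 1 : Nat) : Int) + (n : Int) := by push_cast; ring
    rw [hcast, PySem.List.pyRange_one_cons (by push_cast; omega), List.foldl_cons,
      PySem.List.pySetD_natCast]
    have hcast2 : ((a : Int) + 1) = ((a + 1 : Nat) : Int) := by push_cast; ring
    have hcast3 : ((a + 1 : Nat) : Int) + (n : Int) = (((a + 1) + n : Nat) : Int) := by push_cast; ring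
    rw [hcast2, hcast3, ih (a + 1) (ls.set a []) (by simp; omega)]
    rw [pv_take_set ls a (by omega), List.drop_set_of_lt (by omega)]
    have : a + 1 + n = a + (n + 1) := by omega
    rw [this]
    simp [List.replicate_succ, List.append_assoc]

theorem pv_join_flatten (parts : List (List Char)) :
    PySem.Chars.join [] parts = parts.flatten := by
  induction parts with
  | nil => simp [PySem.Chars.join_nil]
  | cons p rest ih =>
    cases rest with
    | nil => simp [PySem.Chars.join_singleton]
    | cons q rest' =>
      rw [PySem.Chars.join_cons_cons, ih]
      simp

theorem pv_main (fc : String) : sanitize_file_content fc = sanitize_file_content_alt fc := by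
  simp only [sanitize_file_content, sanitize_file_content_alt]
  rw [pv_loopA, pvFindStart_eq, pvFindEndRev_eq]
  cases hP : List.findIdx? (fun l => PySem.Chars.startswith l pvStartTag) (pvSplitKeep [] fc.toList) with
  | none => simp [pvS, hP]
  | some s =>
    cases hQ : pvLastQ (pvSplitKeep [] fc.toList) with
    | none => simp [pvS, pvE, hP, hQ]
    | some e =>
      simp only [pvS, pvE, hP, hQ]
      by_cases hse : s < e
      · have he : e < (pvSplitKeep [] fc.toList).length := pvLastQ_lt_length _ e hQ
        rw [if_pos ⟨by omega, by omega, by exact_mod_cast hse⟩, if_pos hse]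
        have hc1 : (s : Int) + 1 = ((s + 1 : Nat) : Int) := by push_cast; ring
        have hc2 : (e : Int) = (((s + 1) + (e - (s + 1)) : Nat) : Int) := by push_cast; omega
        rw [hc1, hc2, pv_setfold_aux (e - (s + 1)) (s + 1) _ (by omega)]
        have : (s + 1) + (e - (s + 1)) = e := by omega
        rw [this]
        congr 1
        rw [pv_join_flatten, pv_join_flatten]
        simp [List.flatten_append]
      · rw [if_neg (by omega), if_neg hse]

-- ===== VERDICT (by name: the statement is the Claim_ definition above) =====
theorem sanitize_file_content_spec : Claim_equal_sanitize_file_content := by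
  intro fc _
  unfold Spec_sanitize_file_content
  exact pv_main fc
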